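-- pv_equiv track=rewrite | github.com/haebo9/coding-test | 백준/Gold/25682. 체스판 다시 칠하기 2/체스판 다시 칠하기 2.py | mapping_board
-- ===== SOURCE A (Python) =====
-- def mapping_board(board, n, m):
--     # 먼저 잘못된 곳의 값을 1로 매핑하는 작업이 필요함
--     start = board[0][0]
--     mapped = [[0]*(m+1) for _ in range(n+1)]
--     for i in range(0, n):
--         for j in range(0, m, 2):
--             if board[i][j] != start:
--                 mapped[i+1][j+1] = 1
--         for j in range(1, m, 2):
--             if board[i][j] == start:
--                 mapped[i+1][j+1] = 1
--
--         start = ('W' if start == 'B' else 'B')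
--
--     # [i][j]의 값은 [i][j] 값에 [i-1][j]와 [i][j-1]의 값을 합한 값
--     for i in range(n):
--         for j in range(m):
--             mapped[i+1][j+1] = mapped[i+1][j+1] + mapped[i+1][j] + mapped[i][j+1] - mapped[i][j]
--
--     return mapped
-- ===== SOURCE B (Python) =====
-- def _mismatches(row, s, t):
--     ev = row[0:t:2]
--     return (len(ev) - ev.count(s)) + row[1:t:2].count(s)
--
-- def mapping_board(board, n, m):
--     s0 = board[0][0]
--     rows = [[0] * (m + 1) for _ in range(n + 1)]
--     for i in range(1, n + 1):
--         if i == 1: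
--             si = s0
--         elif s0 == 'B':
--             si = 'W' if i % 2 == 0 else 'B'
--         else:
--             si = 'B' if i % 2 == 0 else 'W'
--         cnts = [0] + [_mismatches(board[i - 1], si, t) for t in range(1, m + 1)]
--         rows[i] = [p + c for p, c in zip(rows[i - 1], cnts)]
--     return rows
-- ===== Notes on version B (the rewrite author's own statement) =====
-- stated objective: alternative
-- what changed: B discards A's mismatch-marking grid and the second double loop's 4-term 2D prefix-sum recurrence entirely: the count of repaint cells among the first t cells of a row is computed directly by slicing the row at even/odd positions (row[0:t:2], row[1:t:2]) and using str.count against the row's expected colour (derived in closed form from board[0][0] and the row parity), and consecutive rows of the table are obtained by element-wise addition of the previous finished row; …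
import Mathlib
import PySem

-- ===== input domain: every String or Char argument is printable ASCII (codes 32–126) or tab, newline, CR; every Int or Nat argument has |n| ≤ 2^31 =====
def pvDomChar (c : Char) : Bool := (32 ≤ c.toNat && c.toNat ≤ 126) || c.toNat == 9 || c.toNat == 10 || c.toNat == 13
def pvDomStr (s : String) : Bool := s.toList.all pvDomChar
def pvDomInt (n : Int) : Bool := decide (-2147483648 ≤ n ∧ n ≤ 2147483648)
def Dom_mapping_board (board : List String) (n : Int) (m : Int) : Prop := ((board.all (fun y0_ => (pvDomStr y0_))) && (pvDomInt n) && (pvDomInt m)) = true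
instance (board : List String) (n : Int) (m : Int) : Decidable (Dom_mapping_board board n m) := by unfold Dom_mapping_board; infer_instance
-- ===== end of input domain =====

-- B abandons A's mark-the-grid + 2D prefix-sum recurrence: each table entry's row increment is
-- obtained directly by slicing the row and counting characters, and rows are combined by vector
-- addition (objective: alternative algorithm — direct counting instead of dynamic programming).
-- board[i][j] of both Pythons; exact whenever i < len board and j < len (board[i]) — guaranteed by Pre_ at every use.
def pvChar (board : List String) (i j : Nat) : Char := ((board.getD i "").toList).getD j ' '

-- ===== PORT A =====
def mapping_board (board : List String) (n : Int) (m : Int) : List (List Int) :=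
  -- start = board[0][0]
  let start0 := pvChar board 0 0
  -- mapped = [[0]*(m+1) for _ in range(n+1)]
  let mapped0 : List (List Int) := List.replicate (n+1).toNat (List.replicate (m+1).toNat 0)
  -- first double loop: mark mismatches (evens then odds), flipping start after each row
  let p1 := (PySem.List.pyRange 0 n 1).foldl (fun (st : List (List Int) × Char) i =>
      ((PySem.List.pyRange 1 m 2).foldl (fun g j =>
          if pvChar board i.toNat j.toNat = st.2 then
            g.set (i.toNat+1) ((g.getD (i.toNat+1) []).set (j.toNat+1) 1) else g)
        ((PySem.List.pyRange 0 m 2).foldl (fun g j =>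
          if pvChar board i.toNat j.toNat ≠ st.2 then
            g.set (i.toNat+1) ((g.getD (i.toNat+1) []).set (j.toNat+1) 1) else g) st.1),
       if st.2 = 'B' then 'W' else 'B')) (mapped0, start0)
  -- second double loop: mapped[i+1][j+1] += mapped[i+1][j] + mapped[i][j+1] - mapped[i][j]
  (PySem.List.pyRange 0 n 1).foldl (fun g i =>
      (PySem.List.pyRange 0 m 1).foldl (fun g j =>
          g.set (i.toNat+1) ((g.getD (i.toNat+1) []).set (j.toNat+1)
            ((g.getD (i.toNat+1) []).getD (j.toNat+1) 0 + (g.getD (i.toNat+1) []).getD j.toNat 0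
              + (g.getD i.toNat []).getD (j.toNat+1) 0 - (g.getD i.toNat []).getD j.toNat 0))) g) p1.1

-- ===== PORT B =====
-- _mismatches(row, s, t): count of repaint cells among the first t of the row, by slice + count
def pvMis (row : List Char) (s : Char) (t : Int) : Int :=
  let ev := (PySem.List.slice? row (some 0) (some t) 2).getD []
  ((ev.length : Int) - (ev.count s : Int))
    + (((PySem.List.slice? row (some 1) (some t) 2).getD []).count s : Int)

def mapping_board_alt (board : List String) (n : Int) (m : Int) : List (List Int) :=
  -- s0 = board[0][0]; rows = [[0]*(m+1) for _ in range(n+1)]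
  let s0 := pvChar board 0 0
  (PySem.List.pyRange 1 (n+1) 1).foldl (fun rows i =>
    let si := if i = 1 then s0
      else if s0 = 'B' then (if PySem.Int.mod i 2 = 0 then 'W' else 'B')
      else (if PySem.Int.mod i 2 = 0 then 'B' else 'W')
    let cnts := (0:Int) :: (PySem.List.pyRange 1 (m+1) 1).map
        (fun t => pvMis ((board.getD (i.toNat - 1) "").toList) si t)
    rows.set i.toNat (List.zipWith (fun a b => a + b) (rows.getD (i.toNat - 1) []) cnts))
  (List.replicate (n+1).toNat (List.replicate (m+1).toNat 0))

-- ===== PRECONDITION & SPEC =====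
-- Pre_ excludes exactly the inputs on which Python A raises IndexError: empty board / empty first
-- row (board[0][0]), or — when there are columns to scan (m > 0) — n rows or m columns not
-- actually present in board.
def Pre_mapping_board (board : List String) (n : Int) (m : Int) : Prop :=
  board ≠ [] ∧ board.headI.toList ≠ [] ∧ (m ≤ 0 ∨ (n.toNat ≤ board.length ∧
    ∀ i : Nat, i < n.toNat → m.toNat ≤ ((board.getD i "").toList).length))
instance (board : List String) (n : Int) (m : Int) : Decidable (Pre_mapping_board board n m) := by
  unfold Pre_mapping_board; infer_instance

def pvWitness_mapping_board : List String × Int × Int := (["BWB", "WBW"], 2, 3)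

def Spec_mapping_board (board : List String) (n : Int) (m : Int) (out : List (List Int)) : Prop := out = mapping_board_alt board n m
instance (board : List String) (n : Int) (m : Int) (out : List (List Int)) : Decidable (Spec_mapping_board board n m out) := by unfold Spec_mapping_board; infer_instance

-- ===== CLAIM (what is proved, stated in full; the proofs are below) =====
def Claim_equal_mapping_board : Prop := ∀ (board : List String) (n : Int) (m : Int), Dom_mapping_board board n m → Pre_mapping_board board n m → Spec_mapping_board board n m (mapping_board board n m)
-- ===== LEMMAS AND PROOFS =====

-- the colour A's running variable `start` holds at row i (flipped i times from board[0][0])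
def startA (s : Char) : Nat → Char
  | 0 => s
  | i+1 => if startA s i = 'B' then 'W' else 'B'

-- mismatch value of board cell (i, j) (1 = needs repainting)
def mval (board : List String) (s : Char) (i j : Nat) : Int :=
  if j % 2 = 0 then (if pvChar board i j ≠ startA s i then 1 else 0)
  else (if pvChar board i j = startA s i then 1 else 0)

-- raw (phase-1) row i+1 of A's grid: position 0 keeps 0, position c+1 holds mval i c
def rawv (board : List String) (s : Char) (i : Nat) : Nat → Int
  | 0 => 0
  | c+1 => mval board s i c

-- row sums RS i t = Σ_{c<t} mval i c and prefix-sum table F i t = Σ_{r<i} RS r t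
def RS (board : List String) (s : Char) (i t : Nat) : Int :=
  ∑ c ∈ Finset.range t, mval board s i c
def F (board : List String) (s : Char) (i t : Nat) : Int :=
  ∑ r ∈ Finset.range i, RS board s r t

theorem F_zero (board : List String) (s : Char) (i : Nat) : F board s i 0 = 0 := by
  simp [F, RS]

theorem F_succ (board : List String) (s : Char) (i t : Nat) :
    F board s (i+1) t = F board s i t + RS board s i t := by
  simp [F, Finset.sum_range_succ]

theorem RS_succ (board : List String) (s : Char) (i t : Nat) :
    RS board s i (t+1) = RS board s i t + mval board s i t := by
  simp [RS, Finset.sum_range_succ]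

theorem Frec (board : List String) (s : Char) (r q : Nat) :
    mval board s r q + F board s (r+1) q + F board s r (q+1) - F board s r q
      = F board s (r+1) (q+1) := by
  rw [F_succ, F_succ, RS_succ]
  ring

theorem startA_closed (s : Char) (i : Nat) :
    startA s i = if i = 0 then s
      else if s = 'B' then (if i % 2 = 1 then 'W' else 'B')
      else (if i % 2 = 1 then 'B' else 'W') := by
  induction i with
  | zero => rfl
  | succ i ih =>
    rw [show startA s (i+1) = (if startA s i = 'B' then 'W' else 'B') from rfl, ih]
    rcases Nat.eq_zero_or_pos i with rfl | hi
    · by_cases hB : s = 'B' <;> simp [hB]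
    · have h1 : ¬(i = 0) := by omega
      have h2 : ¬(i + 1 = 0) := by omega
      rcases Nat.even_or_odd i with ⟨c, hc⟩ | ⟨c, hc⟩
      · have e1 : i % 2 = 0 := by omega
        have e2 : (i+1) % 2 = 1 := by omega
        by_cases hB : s = 'B' <;> simp [hB, h1, e1, e2]
      · have e1 : i % 2 = 1 := by omega
        have e2 : ¬((i+1) % 2 = 1) := by omega
        by_cases hB : s = 'B' <;> simp [hB, h1, e1, e2]

theorem getD_set'' {α : Type} (l : List α) (i : Nat) (a : α) (t : Nat) (d : α) :
    (l.set i a).getD t d = if t = i ∧ i < l.length then a else l.getD t d := by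
  simp [List.getD_eq_getElem?_getD, List.getElem?_set]
  split_ifs with h1 h2 h3 <;> simp_all

theorem set_getD_self {α : Type} (l : List α) (i : Nat) (hi : i < l.length) (d : α) :
    l.set i (l.getD i d) = l := by
  rw [List.getD_eq_getElem l d hi, List.set_getElem_self]

theorem eq_mapRange_of_getD (l : List Int) (s : Nat) (f : Nat → Int)
    (hl : l.length = s) (h : ∀ t, t < s → l.getD t 0 = f t) : l = (List.range s).map f := by
  apply List.ext_getElem (by simpa using hl)
  intro i h1 h2
  have := h i (by omega)
  rwa [List.getD_eq_getElem l 0 h1, List.getElem_map, List.getElem_range] at *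

theorem mapRange_set {α : Type} (s : Nat) (f : Nat → α) (i : Nat) (v : α) (_ : i < s) :
    ((List.range s).map f).set i v = (List.range s).map (fun t => if t = i then v else f t) := by
  apply List.ext_getElem (by simp)
  intro t h1 h2
  simp only [List.getElem_set, List.getElem_map, List.getElem_range]
  split_ifs with ha hb hb
  · rfl
  · exact absurd ha.symm hb
  · exact absurd hb.symm ha
  · rfl

theorem replicate_eq_mapRange {α : Type} (s : Nat) (a : α) :
    List.replicate s a = (List.range s).map (fun _ => a) := by
  simp [List.map_const']

theorem rowfold_len (C : Int → Prop) [DecidablePred C] (J : List Int) (row : List Int) :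
    (J.foldl (fun r j => if C j then r.set (j.toNat+1) 1 else r) row).length = row.length := by
  induction J generalizing row with
  | nil => rfl
  | cons j J ih => simp only [List.foldl_cons]; split_ifs <;> simp [ih]

theorem rowfold_getD (C : Int → Prop) [DecidablePred C] (J : List Int) (row : List Int)
    (t : Nat) :
    (J.foldl (fun r j => if C j then r.set (j.toNat+1) 1 else r) row).getD t 0 =
      if (∃ j ∈ J, C j ∧ t = j.toNat + 1) ∧ t < row.length then 1 else row.getD t 0 := by
  induction J generalizing row with
  | nil => simp
  | cons j J ih =>
    simp only [List.foldl_cons]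
    have hE' : (∃ a ∈ j :: J, C a ∧ t = a.toNat + 1) ↔
        ((C j ∧ t = j.toNat + 1) ∨ ∃ a ∈ J, C a ∧ t = a.toNat + 1) := by
      simp only [List.mem_cons, exists_eq_or_imp]
    by_cases hc : C j
    · rw [if_pos hc, ih, List.length_set, getD_set'']
      simp only [hE']
      by_cases hL : t < row.length
      · by_cases hE : ∃ a ∈ J, C a ∧ t = a.toNat + 1
        · simp [hE, hL]
        · by_cases h1 : t = j.toNat + 1
          · subst h1; simp [hc, hL]
          · simp [hE, h1, hL]
      · have hx : ¬(t = j.toNat + 1 ∧ j.toNat + 1 < row.length) := by omega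
        simp [hL, hx]
    · rw [if_neg hc, ih]
      simp only [hE']
      have : ¬(C j ∧ t = j.toNat + 1) := by tauto
      simp [this]

theorem gridfold_commute1 (C : Int → Prop) [DecidablePred C] (J : List Int)
    (g : List (List Int)) (i : Nat) (hi : i < g.length) :
    J.foldl (fun g j => if C j then g.set i ((g.getD i []).set (j.toNat+1) 1) else g) g
    = g.set i (J.foldl (fun r j => if C j then r.set (j.toNat+1) 1 else r) (g.getD i [])) := by
  induction J generalizing g with
  | nil => simp only [List.foldl_nil]; exact (set_getD_self g i hi []).symm
  | cons j J ih =>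
    simp only [List.foldl_cons]
    by_cases hc : C j
    · rw [if_pos hc, if_pos hc, ih _ (by simpa using hi)]
      rw [List.set_set, getD_set'']
      simp [hi]
    · rw [if_neg hc, if_neg hc, ih _ hi]

theorem gridfold_commute2 (J : List Int) (g : List (List Int)) (k : Nat) (hk : k+1 < g.length) :
    J.foldl (fun g j => g.set (k+1) ((g.getD (k+1) []).set (j.toNat+1)
        ((g.getD (k+1) []).getD (j.toNat+1) 0 + (g.getD (k+1) []).getD j.toNat 0
          + (g.getD k []).getD (j.toNat+1) 0 - (g.getD k []).getD j.toNat 0))) g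
    = g.set (k+1) (J.foldl (fun r j => r.set (j.toNat+1)
        (r.getD (j.toNat+1) 0 + r.getD j.toNat 0 + (g.getD k []).getD (j.toNat+1) 0
          - (g.getD k []).getD j.toNat 0)) (g.getD (k+1) [])) := by
  induction J generalizing g with
  | nil => simp only [List.foldl_nil]; exact (set_getD_self g (k+1) hk []).symm
  | cons j J ih =>
    simp only [List.foldl_cons]
    rw [ih _ (by simpa using hk), List.set_set, getD_set'', getD_set'']
    simp [hk]

theorem phase1_row (board : List String) (s0 : Char) (k M : Nat) :
    ((PySem.List.pyRange 1 (M:Int) 2).foldl (fun r j =>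
        if pvChar board k j.toNat = startA s0 k then r.set (j.toNat+1) 1 else r)
      ((PySem.List.pyRange 0 (M:Int) 2).foldl (fun r j =>
        if pvChar board k j.toNat ≠ startA s0 k then r.set (j.toNat+1) 1 else r)
        ((List.range (M+1)).map (fun _ => (0:Int)))))
    = (List.range (M+1)).map (rawv board s0 k) := by
  apply eq_mapRange_of_getD
  · rw [rowfold_len, rowfold_len]; simp
  · intro t ht
    rw [rowfold_getD, rowfold_len, rowfold_getD]
    have hlen : ((List.range (M+1)).map (fun _ => (0:Int))).length = M+1 := by simp
    rw [hlen]
    match t with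
    | 0 =>
      rw [if_neg (by rintro ⟨⟨j, _, _, h⟩, _⟩; omega), if_neg (by rintro ⟨⟨j, _, _, h⟩, _⟩; omega)]
      simp [rawv]
    | c+1 =>
      have hc1 : c + 1 < M + 1 := ht
      have hod : (∃ j ∈ PySem.List.pyRange 1 (M:Int) 2,
          (pvChar board k j.toNat = startA s0 k) ∧ c + 1 = j.toNat + 1) ↔
          (c % 2 = 1 ∧ pvChar board k c = startA s0 k) := by
        constructor
        · rintro ⟨j, hj, hC, hte⟩
          rw [PySem.List.mem_pyRange_iff_of_pos (by norm_num)] at hj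
          have hjc : j = (c:Int) := by omega
          subst hjc
          refine ⟨by omega, by simpa using hC⟩
        · rintro ⟨hpar, hC⟩
          refine ⟨(c:Int), ?_, by simpa using hC, by simp⟩
          rw [PySem.List.mem_pyRange_iff_of_pos (by norm_num)]
          omega
      have hev : (∃ j ∈ PySem.List.pyRange 0 (M:Int) 2,
          (pvChar board k j.toNat ≠ startA s0 k) ∧ c + 1 = j.toNat + 1) ↔
          (c % 2 = 0 ∧ pvChar board k c ≠ startA s0 k) := by
        constructor
        · rintro ⟨j, hj, hC, hte⟩
          rw [PySem.List.mem_pyRange_iff_of_pos (by norm_num)] at hj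
          have hjc : j = (c:Int) := by omega
          subst hjc
          refine ⟨by omega, by simpa using hC⟩
        · rintro ⟨hpar, hC⟩
          refine ⟨(c:Int), ?_, by simpa using hC, by simp⟩
          rw [PySem.List.mem_pyRange_iff_of_pos (by norm_num)]
          omega
      rw [show rawv board s0 k (c+1) = mval board s0 k c from rfl, mval]
      by_cases hp : c % 2 = 0
      · rw [if_pos hp, if_neg (by rw [hod]; omega)]
        by_cases hC : pvChar board k c ≠ startA s0 k
        · rw [if_pos ⟨hev.mpr ⟨hp, hC⟩, hc1⟩, if_pos hC]
        · rw [if_neg (by rw [hev]; tauto), if_neg hC]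
          simp
      · have hp1 : c % 2 = 1 := by omega
        rw [if_neg hp]
        by_cases hC : pvChar board k c = startA s0 k
        · rw [if_pos ⟨hod.mpr ⟨hp1, hC⟩, hc1⟩, if_pos hC]
        · rw [if_neg (by rw [hod]; tauto), if_neg (by rw [hev]; omega), if_neg hC]
          simp

theorem phase2_row (board : List String) (s0 : Char) (r M : Nat) :
    ∀ q, q ≤ M →
    (PySem.List.pyRange 0 (q:Int) 1).foldl (fun row j => row.set (j.toNat+1)
        (row.getD (j.toNat+1) 0 + row.getD j.toNat 0
          + ((List.range (M+1)).map (F board s0 r)).getD (j.toNat+1) 0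
          - ((List.range (M+1)).map (F board s0 r)).getD j.toNat 0))
      ((List.range (M+1)).map (rawv board s0 r))
    = (List.range (M+1)).map
        (fun t => if t ≤ q then F board s0 (r+1) t else rawv board s0 r t) := by
  intro q
  induction q with
  | zero =>
    intro _
    simp only [Nat.cast_zero, PySem.List.pyRange_zero]
    apply List.map_congr_left
    intro t _
    rcases Nat.eq_zero_or_pos t with rfl | ht
    · simp [F_zero, rawv]
    · rw [if_neg (by omega)]
  | succ q ih =>
    intro hq
    have h0q : (0:Int) ≤ (q:Int) := by positivity
    rw [show ((q+1 : Nat) : Int) = (q:Int) + 1 by push_cast; ring,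
      PySem.List.pyRange_one_succ_right h0q, List.foldl_append, ih (by omega)]
    simp only [List.foldl_cons, List.foldl_nil, Int.toNat_natCast]
    rw [PySem.List.getD_map_range (fun t => if t ≤ q then F board s0 (r+1) t else rawv board s0 r t) (M+1) (q+1) 0 (by omega),
      PySem.List.getD_map_range (fun t => if t ≤ q then F board s0 (r+1) t else rawv board s0 r t) (M+1) q 0 (by omega),
      PySem.List.getD_map_range (F board s0 r) (M+1) (q+1) 0 (by omega),
      PySem.List.getD_map_range (F board s0 r) (M+1) q 0 (by omega),
      mapRange_set (M+1) _ (q+1) _ (by omega)]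
    apply List.map_congr_left
    intro t _
    by_cases h1 : t = q + 1
    · subst h1
      have hx : ¬(q + 1 ≤ q) := by omega
      simp only [hx, le_refl, if_true, if_false]
      have : rawv board s0 r (q+1) = mval board s0 r q := rfl
      rw [this]
      linarith [Frec board s0 r q]
    · rw [if_neg h1]
      by_cases h2 : t ≤ q
      · have hx : t ≤ q + 1 := by omega
        simp [h2, hx]
      · have hx : ¬(t ≤ q + 1) := by omega
        simp [h2, hx]

theorem phase1_grid (board : List String) (s0 : Char) (N M : Nat) :
    ∀ k, k ≤ N →
    (PySem.List.pyRange 0 (k:Int) 1).foldl (fun (st : List (List Int) × Char) i =>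
      ((PySem.List.pyRange 1 (M:Int) 2).foldl (fun g j =>
          if pvChar board i.toNat j.toNat = st.2 then
            g.set (i.toNat+1) ((g.getD (i.toNat+1) []).set (j.toNat+1) 1) else g)
        ((PySem.List.pyRange 0 (M:Int) 2).foldl (fun g j =>
          if pvChar board i.toNat j.toNat ≠ st.2 then
            g.set (i.toNat+1) ((g.getD (i.toNat+1) []).set (j.toNat+1) 1) else g) st.1),
       if st.2 = 'B' then 'W' else 'B'))
      (List.replicate (N+1) (List.replicate (M+1) (0:Int)), s0)
    = ((List.range (N+1)).map (fun i => (List.range (M+1)).map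
        (fun t => if 1 ≤ i ∧ i ≤ k then rawv board s0 (i-1) t else 0)), startA s0 k) := by
  intro k
  induction k with
  | zero =>
    intro _
    simp only [Nat.cast_zero, PySem.List.pyRange_zero]
    refine Prod.ext ?_ rfl
    rw [replicate_eq_mapRange, replicate_eq_mapRange]
    apply List.map_congr_left
    intro i _
    apply List.map_congr_left
    intro t _
    rw [if_neg (by omega)]
  | succ k ih =>
    intro hk
    have h0k : (0:Int) ≤ (k:Int) := by positivity
    rw [show ((k+1 : Nat) : Int) = (k:Int) + 1 by push_cast; ring,
      PySem.List.pyRange_one_succ_right h0k, List.foldl_append, ih (by omega)]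
    simp only [List.foldl_cons, List.foldl_nil, Int.toNat_natCast]
    refine Prod.ext ?_ rfl
    simp only []
    have hlen : (List.map (fun i => List.map (fun t => if 1 ≤ i ∧ i ≤ k then rawv board s0 (i - 1) t else 0) (List.range (M + 1))) (List.range (N + 1))).length = N + 1 := by simp
    rw [gridfold_commute1 (fun j => pvChar board k j.toNat ≠ startA s0 k) _ _ (k+1) (by omega)]
    have hzrow : (List.map (fun i => List.map (fun t => if 1 ≤ i ∧ i ≤ k then rawv board s0 (i - 1) t else 0) (List.range (M + 1))) (List.range (N + 1))).getD (k+1) []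
        = (List.range (M+1)).map (fun _ => (0:Int)) := by
      rw [PySem.List.getD_map_range _ (N+1) (k+1) [] (by omega)]
      apply List.map_congr_left
      intro t _
      rw [if_neg (by omega)]
    rw [hzrow]
    rw [gridfold_commute1 (fun j => pvChar board k j.toNat = startA s0 k) _ _ (k+1) (by simp; omega)]
    rw [getD_set'', if_pos ⟨rfl, by rw [hlen]; omega⟩, List.set_set, phase1_row,
      mapRange_set (N+1) _ (k+1) _ (by omega)]
    apply List.map_congr_left
    intro i _
    by_cases h1 : i = k + 1
    · subst h1
      rw [if_pos rfl]
      apply List.map_congr_left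
      intro t _
      rw [if_pos (by omega)]
      norm_num
    · rw [if_neg h1]
      apply List.map_congr_left
      intro t _
      by_cases h2 : 1 ≤ i ∧ i ≤ k
      · rw [if_pos h2, if_pos (by omega)]
      · rw [if_neg h2, if_neg (by omega)]

theorem phase2_grid (board : List String) (s0 : Char) (N M : Nat) :
    ∀ k, k ≤ N →
    (PySem.List.pyRange 0 (k:Int) 1).foldl (fun g i =>
      (PySem.List.pyRange 0 (M:Int) 1).foldl (fun g j =>
          g.set (i.toNat+1) ((g.getD (i.toNat+1) []).set (j.toNat+1)
            ((g.getD (i.toNat+1) []).getD (j.toNat+1) 0 + (g.getD (i.toNat+1) []).getD j.toNat 0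
              + (g.getD i.toNat []).getD (j.toNat+1) 0 - (g.getD i.toNat []).getD j.toNat 0))) g)
      ((List.range (N+1)).map (fun i => (List.range (M+1)).map
        (fun t => if 1 ≤ i ∧ i ≤ N then rawv board s0 (i-1) t else 0)))
    = (List.range (N+1)).map (fun i => (List.range (M+1)).map
        (fun t => if i ≤ k then F board s0 i t
          else (if 1 ≤ i ∧ i ≤ N then rawv board s0 (i-1) t else 0))) := by
  intro k
  induction k with
  | zero =>
    intro _
    simp only [Nat.cast_zero, PySem.List.pyRange_zero]
    apply List.map_congr_left
    intro i _
    apply List.map_congr_left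
    intro t _
    by_cases h1 : i ≤ 0
    · have hi : i = 0 := by omega
      subst hi
      rw [if_pos h1, if_neg (by omega)]
      simp [F]
    · rw [if_neg h1]
  | succ k ih =>
    intro hk
    have h0k : (0:Int) ≤ (k:Int) := by positivity
    rw [show ((k+1 : Nat) : Int) = (k:Int) + 1 by push_cast; ring,
      PySem.List.pyRange_one_succ_right h0k, List.foldl_append, ih (by omega)]
    simp only [List.foldl_cons, List.foldl_nil, Int.toNat_natCast]
    rw [gridfold_commute2 _ _ k (by simp; omega)]
    have hprev : (List.map (fun i => List.map (fun t => if i ≤ k then F board s0 i t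
          else (if 1 ≤ i ∧ i ≤ N then rawv board s0 (i-1) t else 0)) (List.range (M + 1))) (List.range (N + 1))).getD k []
        = (List.range (M+1)).map (F board s0 k) := by
      rw [PySem.List.getD_map_range _ (N+1) k [] (by omega)]
      apply List.map_congr_left
      intro t _
      rw [if_pos (by omega)]
    have hcur : (List.map (fun i => List.map (fun t => if i ≤ k then F board s0 i t
          else (if 1 ≤ i ∧ i ≤ N then rawv board s0 (i-1) t else 0)) (List.range (M + 1))) (List.range (N + 1))).getD (k+1) []
        = (List.range (M+1)).map (rawv board s0 k) := by
      rw [PySem.List.getD_map_range _ (N+1) (k+1) [] (by omega)]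
      apply List.map_congr_left
      intro t _
      rw [if_neg (by omega), if_pos (by omega)]
      norm_num
    rw [hprev, hcur, phase2_row board s0 k M M le_rfl,
      mapRange_set (N+1) _ (k+1) _ (by omega)]
    apply List.map_congr_left
    intro i _
    by_cases h1 : i = k + 1
    · subst h1
      rw [if_pos rfl]
      apply List.map_congr_left
      intro t ht
      rw [if_pos (by simp at ht; omega), if_pos (by omega)]
    · rw [if_neg h1]
      apply List.map_congr_left
      intro t _
      by_cases h2 : i ≤ k
      · rw [if_pos h2, if_pos (by omega)]
      · rw [if_neg h2, if_neg (show ¬(i ≤ k+1) from by omega)]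

theorem portA_eq (board : List String) (N M : Nat) :
    mapping_board board (N:Int) (M:Int)
    = (List.range (N+1)).map (fun i => (List.range (M+1)).map
        (F board (pvChar board 0 0) i)) := by
  unfold mapping_board
  simp only [show ((N:Int)+1).toNat = N+1 by omega, show ((M:Int)+1).toNat = M+1 by omega]
  rw [phase1_grid board (pvChar board 0 0) N M N le_rfl]
  simp only []
  rw [phase2_grid board (pvChar board 0 0) N M N le_rfl]
  apply List.map_congr_left
  intro i hi
  apply List.map_congr_left
  intro t _
  rw [if_pos (by simp at hi; omega)]

-- ----- B side -----

-- xs[a:t:2] for natural a ≤ len, t ≤ len: every second element, explicitly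
theorem slice?_step_two {α : Type} (l : List α) (d : α) (a t : Nat)
    (ht : t ≤ l.length) (ha : a ≤ l.length) :
    PySem.List.slice? l (some (a:Int)) (some (t:Int)) 2
      = some ((List.range ((t + 1 - a)/2)).map (fun k => l.getD (a + 2*k) d)) := by
  unfold PySem.List.slice? PySem.List.sliceIndices
  rw [if_neg (by norm_num : ¬(2:Int) = 0)]
  have hna : ¬((a:Int) < 0) := by omega
  have hnt : ¬((t:Int) < 0) := by omega
  simp only [if_neg (show ¬((2:Int) < 0) by norm_num), if_neg hna, if_neg hnt]
  have hsa : min (a:Int) (l.length:Int) = (a:Int) := min_eq_left (by exact_mod_cast ha)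
  have hst : min (t:Int) (l.length:Int) = (t:Int) := min_eq_left (by exact_mod_cast ht)
  rw [hsa, hst]
  rw [if_pos (by norm_num : (0:Int) < 2)]
  have hcount : (if (a:Int) < (t:Int) then (((t:Int) - (a:Int) + 2 - 1)/2).toNat else 0)
      = (t + 1 - a)/2 := by
    split_ifs with h <;> omega
  rw [hcount]
  congr 1
  have hcg : List.filterMap (fun (x : Nat) => l[((a:Int) + 2 * (x:Int)).toNat]?)
        (List.range ((t + 1 - a)/2))
      = List.filterMap (some ∘ (fun k => l.getD (a + 2*k) d)) (List.range ((t + 1 - a)/2)) := by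
    apply List.filterMap_congr
    intro k hk
    have hk' : k < (t + 1 - a)/2 := by simpa using hk
    have hidx : a + 2*k < l.length := by omega
    have htn : ((a:Int) + 2*(k:Int)).toNat = a + 2*k := by omega
    rw [htn, List.getElem?_eq_getElem hidx]
    simp only [Function.comp_apply]
    rw [List.getD_eq_getElem l d hidx]
  rw [hcg, List.filterMap_eq_map]

theorem count_map_range (f : Nat → Char) (s : Char) (n : Nat) :
    ((((List.range n).map f).count s : Nat) : Int)
      = ∑ k ∈ Finset.range n, (if f k = s then (1:Int) else 0) := by
  induction n with
  | zero => simp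
  | succ n ih =>
    rw [List.range_succ, List.map_append, List.count_append, Finset.sum_range_succ, ← ih]
    by_cases h : f n = s <;> simp [h]

theorem parity_sum (l : List Char) (s : Char) (t : Nat) :
    ((((t + 1)/2 : Nat)) : Int)
      - ∑ k ∈ Finset.range ((t+1)/2), (if l.getD (2*k) ' ' = s then (1:Int) else 0)
      + ∑ k ∈ Finset.range (t/2), (if l.getD (1+2*k) ' ' = s then (1:Int) else 0)
    = ∑ c ∈ Finset.range t,
        (if c % 2 = 0 then (if l.getD c ' ' ≠ s then (1:Int) else 0)
          else (if l.getD c ' ' = s then 1 else 0)) := by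
  induction t with
  | zero => simp
  | succ t ih =>
    rw [Finset.sum_range_succ (fun c => if c % 2 = 0 then (if l.getD c ' ' ≠ s then (1:Int) else 0) else (if l.getD c ' ' = s then 1 else 0)) t, ← ih]
    by_cases hp : t % 2 = 0
    · rw [show (t+1+1)/2 = (t+1)/2 + 1 by omega,
        Finset.sum_range_succ (fun k => if l.getD (2*k) ' ' = s then (1:Int) else 0) ((t+1)/2),
        show 2*((t+1)/2) = t by omega, show (t+1)/2 = t/2 by omega, if_pos hp]
      by_cases h : l.getD t ' ' = s
      · rw [if_pos h, if_neg (not_not_intro h)]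
        push_cast
        ring
      · rw [if_neg h, if_pos h]
        push_cast
        ring
    · rw [show (t+1+1)/2 = (t+1)/2 by omega, show (t+1)/2 = t/2 + 1 by omega,
        Finset.sum_range_succ (fun k => if l.getD (1+2*k) ' ' = s then (1:Int) else 0) (t/2),
        show 1+2*(t/2) = t by omega, if_neg hp]
      push_cast
      ring

theorem pvMis_eq (l : List Char) (s : Char) (t : Nat) (ht : t ≤ l.length) :
    pvMis l s (t:Int) = ∑ c ∈ Finset.range t,
      (if c % 2 = 0 then (if l.getD c ' ' ≠ s then (1:Int) else 0)
        else (if l.getD c ' ' = s then 1 else 0)) := by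
  rcases Nat.eq_zero_or_pos t with rfl | ht1
  · have h0 := slice?_step_two l ' ' 0 0 (by omega) (by omega)
    have h1 : PySem.List.slice? l (some (1:Int)) (some (0:Int)) 2 = some [] := by
      unfold PySem.List.slice? PySem.List.sliceIndices
      rw [if_neg (by norm_num : ¬(2:Int) = 0)]
      simp only [if_neg (show ¬((2:Int) < 0) by norm_num), if_neg (show ¬((1:Int) < 0) by norm_num),
        if_neg (show ¬((0:Int) < 0) by norm_num)]
      have hlt : ¬ (min (1:Int) (l.length:Int) < min (0:Int) (l.length:Int)) := by
        rcases le_or_gt 1 (l.length:Int) with h | h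
        · rw [min_eq_left h, min_eq_left (by omega)]; norm_num
        · have h0' : (l.length : Int) = 0 := by omega
          rw [h0']; norm_num
      rw [if_pos (by norm_num : (0:Int) < 2), if_neg hlt]
      simp
    simp only [Nat.cast_zero] at h0 ⊢
    rw [pvMis, h0, h1]
    simp
  · have hl1 : 1 ≤ l.length := by omega
    have h0 := slice?_step_two l ' ' 0 t ht (by omega)
    have h1 := slice?_step_two l ' ' 1 t ht hl1
    simp only [Nat.cast_zero, Nat.cast_one] at h0 h1
    rw [pvMis, h0, h1]
    simp only [Option.getD_some, List.length_map, List.length_range]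
    rw [count_map_range, count_map_range]
    simp only [Nat.sub_zero, Nat.add_sub_cancel, Nat.zero_add]
    exact parity_sum l s t

theorem pvMis_eq_RS (board : List String) (s0 : Char) (i t : Nat)
    (ht : t ≤ ((board.getD i "").toList).length) :
    pvMis ((board.getD i "").toList) (startA s0 i) (t:Int) = RS board s0 i t := by
  rw [pvMis_eq _ _ t ht, RS]
  apply Finset.sum_congr rfl
  intro c _
  rfl

theorem bGrid (board : List String) (s0 : Char) (N M : Nat)
    (hlen : ∀ i, i < N → 1 ≤ M → M ≤ ((board.getD i "").toList).length) :
    ∀ k, k ≤ N →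
    (PySem.List.pyRange 1 ((k:Int)+1) 1).foldl (fun rows i =>
      let si := if i = 1 then s0
        else if s0 = 'B' then (if PySem.Int.mod i 2 = 0 then 'W' else 'B')
        else (if PySem.Int.mod i 2 = 0 then 'B' else 'W')
      let cnts := (0:Int) :: (PySem.List.pyRange 1 ((M:Int)+1) 1).map
          (fun t => pvMis ((board.getD (i.toNat - 1) "").toList) si t)
      rows.set i.toNat (List.zipWith (fun a b => a + b) (rows.getD (i.toNat - 1) []) cnts))
      (List.replicate (N+1) (List.replicate (M+1) (0:Int)))
    = (List.range (N+1)).map (fun i => (List.range (M+1)).map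
        (fun t => if i ≤ k then F board s0 i t else 0)) := by
  intro k
  induction k with
  | zero =>
    intro _
    rw [show ((0:Nat):Int) + 1 = 1 by norm_num, PySem.List.pyRange_one_eq_nil le_rfl]
    simp only [List.foldl_nil]
    rw [replicate_eq_mapRange]
    apply List.map_congr_left
    intro i _
    rw [replicate_eq_mapRange]
    apply List.map_congr_left
    intro t _
    by_cases h1 : i ≤ 0
    · have hi : i = 0 := by omega
      subst hi
      rw [if_pos h1]
      simp [F]
    · rw [if_neg h1]
  | succ k ih =>
    intro hk
    rw [show (((k+1:Nat)):Int) + 1 = ((k:Int) + 1) + 1 by push_cast; ring,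
      PySem.List.pyRange_one_succ_right (by omega : (1:Int) ≤ (k:Int) + 1),
      List.foldl_append, ih (by omega)]
    simp only [List.foldl_cons, List.foldl_nil]
    have htn : ((k:Int) + 1).toNat = k + 1 := by omega
    rw [htn]
    have hsi : (if ((k:Int)+1) = 1 then s0
        else if s0 = 'B' then (if PySem.Int.mod ((k:Int)+1) 2 = 0 then 'W' else 'B')
        else (if PySem.Int.mod ((k:Int)+1) 2 = 0 then 'B' else 'W')) = startA s0 k := by
      rw [startA_closed]
      have hmod : PySem.Int.mod ((k:Int)+1) 2 = (((k+1) % 2 : Nat) : Int) := by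
        rw [show ((k:Int)+1) = ((k+1:Nat):Int) by push_cast; ring]
        exact_mod_cast PySem.Int.mod_natCast (k+1) 2
      by_cases hk0 : k = 0
      · subst hk0
        norm_num
      · rw [if_neg (show ¬((k:Int)+1 = 1) by omega), if_neg hk0, hmod]
        by_cases hp : k % 2 = 1
        · rw [show ((((k+1) % 2 : Nat)):Int) = 0 by omega]
          by_cases hB : s0 = 'B' <;> simp [hB, hp]
        · rw [show ((((k+1) % 2 : Nat)):Int) = 1 by omega]
          by_cases hB : s0 = 'B' <;> simp [hB, hp]
    rw [hsi]
    have hcnts : ((0:Int) :: (PySem.List.pyRange 1 ((M:Int)+1) 1).map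
          (fun t => pvMis ((board.getD (k + 1 - 1) "").toList) (startA s0 k) t))
        = (List.range (M+1)).map (RS board s0 k) := by
      rw [PySem.List.pyRange_one 1 ((M:Int)+1), show (((M:Int)+1) - 1).toNat = M by omega,
        List.map_map, List.range_succ_eq_map, List.map_cons, List.map_map,
        show RS board s0 k 0 = 0 by simp [RS]]
      congr 1
      · apply List.map_congr_left
        intro j hj
        have hjM : j < M := by simpa using hj
        simp only [Function.comp_apply, Nat.add_sub_cancel]
        rw [show ((1:Int) + (j:Int)) = (((j+1:Nat)):Int) by push_cast; ring]
        have hle : j + 1 ≤ ((board.getD k "").toList).length :=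
          le_trans (by omega) (hlen k (by omega) (by omega))
        rw [pvMis_eq_RS board s0 k (j+1) hle]
    rw [hcnts]
    have hprev : (List.map (fun i => List.map (fun t => if i ≤ k then F board s0 i t else 0)
          (List.range (M + 1))) (List.range (N + 1))).getD (k + 1 - 1) []
        = (List.range (M+1)).map (F board s0 k) := by
      rw [show k + 1 - 1 = k from rfl, PySem.List.getD_map_range _ (N+1) k [] (by omega)]
      apply List.map_congr_left
      intro t _
      rw [if_pos (by omega)]
    rw [hprev, List.zipWith_map, List.zipWith_self,
      mapRange_set (N+1) _ (k+1) _ (by omega)]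
    apply List.map_congr_left
    intro i _
    by_cases h1 : i = k + 1
    · subst h1
      rw [if_pos rfl]
      apply List.map_congr_left
      intro t _
      rw [if_pos (le_refl (k+1)), F_succ]
    · rw [if_neg h1]
      apply List.map_congr_left
      intro t _
      by_cases h2 : i ≤ k
      · rw [if_pos h2, if_pos (by omega)]
      · rw [if_neg h2, if_neg (show ¬(i ≤ k+1) from by omega)]

theorem portB_eq (board : List String) (N M : Nat)
    (hlen : ∀ i, i < N → 1 ≤ M → M ≤ ((board.getD i "").toList).length) :
    mapping_board_alt board (N:Int) (M:Int)
    = (List.range (N+1)).map (fun i => (List.range (M+1)).map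
        (F board (pvChar board 0 0) i)) := by
  unfold mapping_board_alt
  simp only [show ((N:Int)+1).toNat = N+1 by omega, show ((M:Int)+1).toNat = M+1 by omega]
  rw [bGrid board (pvChar board 0 0) N M hlen N le_rfl]
  apply List.map_congr_left
  intro i hi
  apply List.map_congr_left
  intro t _
  rw [if_pos (by simp at hi; omega)]

theorem getD_replicate_nilrow (n i : Nat) :
    (List.replicate n ([]:List Int)).getD i [] = [] := by
  simp [List.getD_eq_getElem?_getD, List.getElem?_replicate]
  split_ifs <;> simp

theorem set_replicate_nilrow (n i : Nat) :
    (List.replicate n ([]:List Int)).set i [] = List.replicate n [] := by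
  apply List.ext_getElem (by simp)
  intro t h1 h2
  simp only [List.getElem_set]
  split_ifs <;> simp

theorem portB_negM (board : List String) (N : Nat) (m : Int) (hm : m < 0) :
    mapping_board_alt board (N:Int) m = List.replicate (N+1) [] := by
  unfold mapping_board_alt
  rw [show (m+1).toNat = 0 by omega, show ((N:Int)+1).toNat = N+1 by omega,
    PySem.List.pyRange_one_eq_nil (by omega : m + 1 ≤ 1)]
  rw [show (List.replicate 0 (0:Int)) = [] from rfl]
  have hstep : ∀ (J : List Int),
      J.foldl (fun (rows : List (List Int)) i =>
        rows.set i.toNat (List.zipWith (fun a b => a + b) (rows.getD (i.toNat - 1) []) [0]))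
        (List.replicate (N+1) []) = List.replicate (N+1) [] := by
    intro J
    induction J with
    | nil => rfl
    | cons x J ih =>
      rw [List.foldl_cons, getD_replicate_nilrow,
        show List.zipWith (fun a b => a + b) ([]:List Int) [0] = [] from rfl,
        set_replicate_nilrow]
      exact ih
  exact hstep _

theorem pyRange2_nil (a m : Int) (h : m ≤ a) : PySem.List.pyRange a m 2 = [] := by
  rw [PySem.List.pyRange_of_pos _ _ (by norm_num : (0:Int) < 2), if_neg (by omega)]
  simp

theorem foldl_id {α β : Type} (l : List β) (g : α) : l.foldl (fun g _ => g) g = g := by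
  induction l with
  | nil => rfl
  | cons x l ih => rw [List.foldl_cons]; exact ih

theorem foldl_fst_flip (l : List Int) (p : List (List Int) × Char) :
    (l.foldl (fun (st : List (List Int) × Char) _ => (st.1, if st.2 = 'B' then 'W' else 'B')) p).1
      = p.1 := by
  induction l generalizing p with
  | nil => rfl
  | cons x l ih => simpa using ih _

theorem portA_negM (board : List String) (N : Nat) (m : Int) (hm : m < 0) :
    mapping_board board (N:Int) m = List.replicate (N+1) [] := by
  unfold mapping_board
  rw [pyRange2_nil 0 m (by omega), pyRange2_nil 1 m (by omega),
    PySem.List.pyRange_one_eq_nil (by omega : m ≤ 0)]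
  simp only [List.foldl_nil, foldl_id, foldl_fst_flip]
  rw [show (m+1).toNat = 0 by omega, show ((N:Int)+1).toNat = N+1 by omega]
  rfl

theorem portA_negN (board : List String) (n m : Int) (hn : n < 0) :
    mapping_board board n m = [] := by
  unfold mapping_board
  rw [PySem.List.pyRange_one_eq_nil (by omega : n ≤ 0)]
  simp only [List.foldl_nil]
  rw [show (n+1).toNat = 0 by omega]
  rfl

theorem portB_negN (board : List String) (n m : Int) (hn : n < 0) :
    mapping_board_alt board n m = [] := by
  unfold mapping_board_alt
  rw [PySem.List.pyRange_one_eq_nil (by omega : n + 1 ≤ 1)]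
  simp only [List.foldl_nil]
  rw [show (n+1).toNat = 0 by omega]
  rfl

-- ===== VERDICT =====
theorem mapping_board_spec : Claim_equal_mapping_board := by
  intro board n m _ hpre
  unfold Spec_mapping_board
  by_cases hn : 0 ≤ n
  · obtain ⟨N, rfl⟩ : ∃ N : Nat, n = (N:Int) := ⟨n.toNat, (Int.toNat_of_nonneg hn).symm⟩
    by_cases hm : 0 ≤ m
    · obtain ⟨M, rfl⟩ : ∃ M : Nat, m = (M:Int) := ⟨m.toNat, (Int.toNat_of_nonneg hm).symm⟩
      have hlen : ∀ i, i < N → 1 ≤ M → M ≤ ((board.getD i "").toList).length := by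
        intro i hi hM
        rcases hpre.2.2 with h | ⟨_, h⟩
        · omega
        · have := h i (by simpa using hi)
          simpa using this
      rw [portA_eq, portB_eq board N M hlen]
    · rw [portA_negM board N m (by omega), portB_negM board N m (by omega)]
  · rw [portA_negN board n m (by omega), portB_negN board n m (by omega)]
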